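-- pv_equiv track=rewrite | github.com/JiayouQin/Python-projects | 06 SSR Traffic Data GUI App/06 SSR Traffic Data GUI App.py | fuckcharachters
-- ===== SOURCE A (Python) =====
-- def fuckcharachters(inputstring):
--     numbers = ["1","2","3","4","5","6","7","8","9","0"]
--     if inputstring[0] not in numbers:
--         inputstring = inputstring[1:]
--         inputstring = fuckcharachters(inputstring)
--     else:
--         pass
--     return inputstring
-- ===== SOURCE B (Python) =====
-- def fuckcharachters(inputstring):
--     i = 0
--     while inputstring[i] not in "0123456789":
--         i += 1
--     return inputstring[i:]
-- ===== Notes on version B (the rewrite author's own statement) =====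
-- stated objective: simpler
-- what changed: Replaces recursion that rebuilds a sliced string at each step with a single index-scan loop that finds the first digit and slices once.
-- outside the precondition, e.g. on fuckcharachters('abc'): A raises IndexError, B raises IndexError
import Mathlib
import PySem

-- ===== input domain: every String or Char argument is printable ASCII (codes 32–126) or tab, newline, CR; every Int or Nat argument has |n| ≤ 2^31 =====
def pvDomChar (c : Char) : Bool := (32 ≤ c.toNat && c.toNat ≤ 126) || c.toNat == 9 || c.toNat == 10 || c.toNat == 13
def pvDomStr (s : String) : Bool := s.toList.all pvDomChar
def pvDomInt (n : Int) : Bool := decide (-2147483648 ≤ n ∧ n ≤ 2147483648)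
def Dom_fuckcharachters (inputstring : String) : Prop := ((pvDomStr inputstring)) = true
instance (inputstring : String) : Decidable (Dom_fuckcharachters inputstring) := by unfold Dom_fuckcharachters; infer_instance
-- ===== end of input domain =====

-- B replaces A's recursion on string slices by a single index scan for the first digit
-- followed by one slice (objective: simpler).


def pvDigits : List Char := ['1','2','3','4','5','6','7','8','9','0']

-- ===== PORT A =====
-- A's recursion: if the first character is not a digit, recurse on the tail.
-- On [] Python's inputstring[0] raises IndexError; excluded by Pre_.
def fuckArec : List Char → List Char
  | [] => []          -- IndexError in Python; outside Pre_
  | c :: rest => if c ∈ pvDigits then c :: rest else fuckArec rest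

def fuckcharachters (inputstring : String) : String :=
  String.ofList (fuckArec inputstring.toList)

-- ===== PORT B =====
-- B's while loop: advance index i while inputstring[i] is not a digit.
-- Running past the end is Python's IndexError; excluded by Pre_.
def fuckBloop (cs : List Char) (i : Nat) : Nat :=
  if h : i < cs.length then
    if cs[i] ∈ "0123456789".toList then i else fuckBloop cs (i + 1)
  else i              -- IndexError in Python; outside Pre_
termination_by cs.length - i

def fuckcharachters_alt (inputstring : String) : String :=
  String.ofList (inputstring.toList.drop (fuckBloop inputstring.toList 0))

-- ===== PRECONDITION & SPEC =====
-- Pre_ excludes exactly the inputs on which A raises IndexError: strings with no digit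
-- (including the empty string).
def Pre_fuckcharachters (inputstring : String) : Prop :=
  (inputstring.toList.any (fun c => c ∈ pvDigits)) = true
instance (inputstring : String) : Decidable (Pre_fuckcharachters inputstring) := by
  unfold Pre_fuckcharachters; infer_instance

def pvWitness_fuckcharachters : String := "ab12c"

def Spec_fuckcharachters (inputstring : String) (out : String) : Prop := out = fuckcharachters_alt inputstring
instance (inputstring : String) (out : String) : Decidable (Spec_fuckcharachters inputstring out) := by unfold Spec_fuckcharachters; infer_instance

-- ===== CLAIM (what is proved, stated in full; the proofs are below) =====
def Claim_equal_fuckcharachters : Prop := ∀ (inputstring : String), Dom_fuckcharachters inputstring → Pre_fuckcharachters inputstring → Spec_fuckcharachters inputstring (fuckcharachters inputstring)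

-- ===== LEMMAS AND PROOFS =====

theorem digits_same (c : Char) : (c ∈ "0123456789".toList) = (c ∈ pvDigits) := by
  simp [pvDigits]; tauto

theorem fuckBloop_cons_succ_aux (n : Nat) : ∀ (c : Char) (cs : List Char) (i : Nat),
    cs.length - i ≤ n → fuckBloop (c :: cs) (i + 1) = fuckBloop cs i + 1 := by
  induction n with
  | zero =>
      intro c cs i hn
      conv_lhs => rw [fuckBloop]
      conv_rhs => rw [fuckBloop]
      simp only [List.length_cons]
      rw [dif_neg (by omega), dif_neg (by omega)]
  | succ n ih =>
      intro c cs i hn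
      conv_lhs => rw [fuckBloop]
      conv_rhs => rw [fuckBloop]
      simp only [List.length_cons]
      by_cases h : i < cs.length
      · rw [dif_pos (by omega), dif_pos h]
        simp only [List.getElem_cons_succ]
        by_cases hd : cs[i] ∈ "0123456789".toList
        · rw [if_pos hd, if_pos hd]
        · rw [if_neg hd, if_neg hd, ih c cs (i + 1) (by omega)]
      · rw [dif_neg (by omega), dif_neg h]

theorem fuckBloop_cons_succ (c : Char) (cs : List Char) (i : Nat) :
    fuckBloop (c :: cs) (i + 1) = fuckBloop cs i + 1 :=
  fuckBloop_cons_succ_aux (cs.length - i) c cs i (le_refl _)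

theorem fuckAB (cs : List Char) (h : cs.any (fun c => c ∈ pvDigits) = true) :
    fuckArec cs = cs.drop (fuckBloop cs 0) := by
  induction cs with
  | nil => simp at h
  | cons c rest ih =>
      rw [fuckArec, fuckBloop]
      simp only [List.length_cons, List.getElem_cons_zero]
      rw [dif_pos (by omega)]
      simp only [digits_same]
      by_cases hc : c ∈ pvDigits
      · simp [hc]
      · simp only [List.any_cons, Bool.or_eq_true, decide_eq_true_eq] at h
        rcases h with h | h
        · exact absurd h hc
        · rw [if_neg hc, if_neg hc, fuckBloop_cons_succ, List.drop_succ_cons, ih h]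

-- ===== VERDICT (by name: the statement is the Claim_ definition above) =====
theorem fuckcharachters_spec : Claim_equal_fuckcharachters := by
  intro s _ hpre
  unfold Spec_fuckcharachters fuckcharachters fuckcharachters_alt
  rw [fuckAB s.toList hpre]
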